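-- pv_equiv track=rewrite | github.com/danrsc/paradigms | tagged_file_reader.py | _split_non_escaped
-- ===== SOURCE A (Python) =====
-- def _is_line_pos_escaped(line, index):
--     index -= 1
--     is_escaped = False
--     while index >= 0:
--         if line[index] == '\\':
--             is_escaped = not is_escaped
--             index -= 1
--         else:
--             break
--     return is_escaped
--
-- def _non_escaped_indices(line, char):
--     indices = list()
--     for index in range(len(line)):
--         if line[index] == char and not _is_line_pos_escaped(line, index):
--             indices.append(index)
--     return indices
--
-- def _split_non_escaped(line, delim, is_keep_empty, is_unescape=False):
--     indices = _non_escaped_indices(line, delim)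
--     tokens = list()
--     if len(indices) == 0:
--         tokens.append(line)
--     else:
--         for index_of_delim, index_delim in enumerate(indices):
--             if index_of_delim == 0:
--                 tokens.append(line[:index_delim])
--             else:
--                 index_start = indices[index_of_delim - 1] + 1
--                 tokens.append(line[index_start:index_delim])
--         tokens.append(line[indices[-1] + 1:])
--     if not is_keep_empty:
--         tokens = list(filter(lambda token: len(token) > 0, tokens))
--     if is_unescape:
--         tokens = list(map(lambda token: _unescape(token), tokens))
--     return tokens
--
-- def _unescape(s):
--
--     is_escape = False
--     escaped = None
--     for index in range(len(s)):
--         if s[index] == '\\':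
--             if escaped is None:  # first time we encounter escape
--                 escaped = s[:index]
--             is_escape = not is_escape
--             if not is_escape:
--                 escaped += '\\'
--         else:
--             is_escape = False
--             if escaped is not None:
--                 escaped += s[index]
--     return escaped if escaped is not None else s
-- ===== SOURCE B (Python) =====
-- # B: single left-to-right pass; escape state = parity of the run of consecutive
-- # backslashes just before the current position; no backward rescans, no index list.
--
-- def _unescape(s):
--     out = []
--     pending = False
--     for ch in s:
--         if ch == '\\':
--             if pending:
--                 out.append('\\')
--                 pending = False
--             else:
--                 pending = True
--         else:
--             out.append(ch)
--             pending = False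
--     return ''.join(out)
--
--
-- def _split_non_escaped(line, delim, is_keep_empty, is_unescape=False):
--     tokens = []
--     cur = []
--     backslashes = 0
--     for ch in line:
--         if ch == delim and backslashes % 2 == 0:
--             tokens.append(''.join(cur))
--             cur = []
--         else:
--             cur.append(ch)
--         backslashes = backslashes + 1 if ch == '\\' else 0
--     tokens.append(''.join(cur))
--     if not is_keep_empty:
--         tokens = [t for t in tokens if t]
--     if is_unescape:
--         tokens = [_unescape(t) for t in tokens]
--     return tokens
-- ===== Notes on version B (the rewrite author's own statement) =====
-- stated objective: alternative
-- what changed: A rescans backwards from every position to decide escapedness and then cuts the line by a stored list of delimiter indices; B does one left-to-right pass keeping the length of the current backslash run (escape state = its parity) and accumulating the current token, so the backward scans and the index list disappear.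
import Mathlib
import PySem

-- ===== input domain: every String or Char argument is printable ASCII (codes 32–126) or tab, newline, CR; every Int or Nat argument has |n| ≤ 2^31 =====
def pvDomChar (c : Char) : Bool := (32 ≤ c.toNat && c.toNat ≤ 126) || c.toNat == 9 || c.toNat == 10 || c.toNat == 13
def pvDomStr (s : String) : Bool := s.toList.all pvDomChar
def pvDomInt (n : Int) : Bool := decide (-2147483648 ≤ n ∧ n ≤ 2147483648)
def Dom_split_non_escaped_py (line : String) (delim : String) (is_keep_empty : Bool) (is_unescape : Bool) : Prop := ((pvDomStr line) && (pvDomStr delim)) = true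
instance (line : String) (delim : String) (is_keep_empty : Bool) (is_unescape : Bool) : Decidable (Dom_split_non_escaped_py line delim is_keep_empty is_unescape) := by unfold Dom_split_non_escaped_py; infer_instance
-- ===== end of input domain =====

-- B replaces A's backward escapedness rescans and delimiter-index slicing by one
-- left-to-right pass tracking the current backslash-run length (escape = odd run).

-- ===== PORT A =====
-- A's strings are handled as List Char; slices line[a:b] with 0 ≤ a ≤ b are the
-- clamped (l.drop a).take (b-a), exact per PySem.List.slice_natCast.

-- the 'index -= 1; while index >= 0: ...' loop of _is_line_pos_escaped
def aEscLoop (line : List Char) : Nat → Bool → Bool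
  | 0, is_escaped => is_escaped
  | idx+1, is_escaped =>
      if line.getD idx ' ' = '\\' then aEscLoop line idx (!is_escaped) else is_escaped

def aIsEscaped (line : List Char) (index : Nat) : Bool := aEscLoop line index false

-- _non_escaped_indices: 'line[index] == char' compares a 1-char string with delim
def aIndices (line delim : List Char) : List Nat :=
  (List.range line.length).filter
    (fun index => decide ([line.getD index ' '] = delim) && !aIsEscaped line index)

-- loop body over enumerate(indices): p = (index_delim, index_of_delim)
def aSliceToken (line : List Char) (indices : List Nat) (tokens : List (List Char))
    (p : Nat × Nat) : List (List Char) :=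
  if p.2 = 0 then tokens ++ [line.take p.1]
  else
    let start := indices.getD (p.2 - 1) 0 + 1
    tokens ++ [(line.drop start).take (p.1 - start)]

def aTokens (line : List Char) (indices : List Nat) : List (List Char) :=
  if indices = [] then [line]
  else (indices.zipIdx.foldl (aSliceToken line indices) [])
       ++ [line.drop (indices.getLast?.getD 0 + 1)]

-- _unescape: state (is_escape, escaped : Option); 'escaped = s[:index]' on first backslash
def aUnescape (s : List Char) : List Char :=
  let r := s.zipIdx.foldl
    (fun (st : Bool × Option (List Char)) (p : Char × Nat) =>
      if p.1 = '\\' then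
        let escaped := match st.2 with | none => some (s.take p.2) | some e => some e
        let is_escape := !st.1
        (is_escape, if is_escape then escaped else escaped.map (fun e => e ++ ['\\']))
      else (false, st.2.map (fun e => e ++ [p.1])))
    (false, none)
  r.2.getD s

def split_non_escaped_py (line : String) (delim : String) (is_keep_empty : Bool) (is_unescape : Bool) : List String :=
  let l := line.toList
  let indices := aIndices l delim.toList
  let tokens := aTokens l indices
  let tokens := if !is_keep_empty then tokens.filter (fun t => decide (t.length > 0)) else tokens
  let tokens := if is_unescape then tokens.map aUnescape else tokens
  tokens.map (fun t => String.ofList t)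

-- ===== PORT B =====

-- 'backslashes = backslashes + 1 if ch == '\\' else 0'
def bStep (bs : Nat) (c : Char) : Nat := if c = '\\' then bs + 1 else 0

-- body of B's single pass: state (tokens, cur, backslashes)
def bSplitStep (delim : List Char) (st : List (List Char) × List Char × Nat)
    (c : Char) : List (List Char) × List Char × Nat :=
  if [c] = delim ∧ st.2.2 % 2 = 0 then (st.1 ++ [st.2.1], [], bStep st.2.2 c)
  else (st.1, st.2.1 ++ [c], bStep st.2.2 c)

-- B's _unescape: state (out, pending)
def bUnescape (s : List Char) : List Char :=
  (s.foldl (fun (st : List Char × Bool) c =>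
      if c = '\\' then
        if st.2 then (st.1 ++ ['\\'], false) else (st.1, true)
      else (st.1 ++ [c], false))
    ([], false)).1

def split_non_escaped_py_alt (line : String) (delim : String) (is_keep_empty : Bool) (is_unescape : Bool) : List String :=
  let r := line.toList.foldl (bSplitStep delim.toList) ([], [], 0)
  let tokens := r.1 ++ [r.2.1]
  let tokens := if !is_keep_empty then tokens.filter (fun t => !t.isEmpty) else tokens
  let tokens := if is_unescape then tokens.map bUnescape else tokens
  tokens.map (fun t => String.ofList t)

-- ===== PRECONDITION & SPEC =====
def Spec_split_non_escaped_py (line : String) (delim : String) (is_keep_empty : Bool) (is_unescape : Bool) (out : List String) : Prop := out = split_non_escaped_py_alt line delim is_keep_empty is_unescape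
instance (line : String) (delim : String) (is_keep_empty : Bool) (is_unescape : Bool) (out : List String) : Decidable (Spec_split_non_escaped_py line delim is_keep_empty is_unescape out) := by unfold Spec_split_non_escaped_py; infer_instance

-- ===== CLAIM (what is proved, stated in full; the proofs are below) =====
def Claim_equal_split_non_escaped_py : Prop := ∀ (line : String) (delim : String) (is_keep_empty : Bool) (is_unescape : Bool), Dom_split_non_escaped_py line delim is_keep_empty is_unescape → Spec_split_non_escaped_py line delim is_keep_empty is_unescape (split_non_escaped_py line delim is_keep_empty is_unescape)

-- ===== LEMMAS AND PROOFS =====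

-- reference splitter: structural recursion carrying the backslash-run length
def goSplit (delim : List Char) : List Char → Nat → List (List Char)
  | [], _ => [[]]
  | c :: t, bs =>
      if [c] = delim ∧ bs % 2 = 0 then [] :: goSplit delim t (bStep bs c)
      else match goSplit delim t (bStep bs c) with
        | [] => [[c]]
        | u :: us => (c :: u) :: us

-- tokens cut out of l by an index list, starting at position st
def mkTok (l : List Char) : Nat → List Nat → List (List Char)
  | st, [] => [l.drop st]
  | st, i :: is => (l.drop st).take (i - st) :: mkTok l (i+1) is

-- the middle tokens between consecutive indices, previous index p
def pairToks (l : List Char) : Nat → List Nat → List (List Char)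
  | _, [] => []
  | p, i :: is => ((l.drop (p+1)).take (i - (p+1))) :: pairToks l i is

def lastD : Nat → List Nat → Nat
  | p, [] => p
  | _, i :: is => lastD i is

-- split positions of l when bs backslashes immediately precede l
def idxs (delim l : List Char) (bs : Nat) : List Nat :=
  (List.range l.length).filter
    (fun i => decide ([l.getD i ' '] = delim) && decide ((l.take i).foldl bStep bs % 2 = 0))

def consHead (cur : List Char) : List (List Char) → List (List Char)
  | [] => [cur]
  | u :: us => (cur ++ u) :: us

theorem goSplit_ne_nil (delim : List Char) (l : List Char) (bs : Nat) :
    goSplit delim l bs ≠ [] := by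
  cases l with
  | nil => simp [goSplit]
  | cons c t =>
    simp only [goSplit]
    split
    · simp
    · split <;> simp

theorem aEscLoop_parity (l : List Char) :
    ∀ (i : Nat), i ≤ l.length → ∀ esc,
      aEscLoop l i esc = (xor esc (decide ((l.take i).foldl bStep 0 % 2 = 1))) := by
  intro i
  induction i with
  | zero => intro _ esc; simp [aEscLoop]
  | succ n ih =>
    intro h esc
    have hn : n < l.length := by omega
    have htake : l.take (n+1) = l.take n ++ [l[n]] := by
      rw [List.take_add_one, List.getElem?_eq_getElem hn]; rfl
    rw [aEscLoop, htake, List.foldl_append]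
    simp only [List.foldl]
    have hg : l.getD n ' ' = l[n] := by simp [List.getD, List.getElem?_eq_getElem hn]
    rw [hg]
    by_cases hb : l[n] = '\\'
    · rw [if_pos hb]
      rw [ih (by omega) (!esc)]
      simp only [bStep, if_pos hb]
      rcases Nat.mod_two_eq_zero_or_one ((l.take n).foldl bStep 0) with hp | hp <;>
        · rw [hp]; cases esc <;> simp [Nat.add_mod, hp]
    · rw [if_neg hb]
      simp [bStep, hb]

theorem aIndices_eq_idxs (l delim : List Char) : aIndices l delim = idxs delim l 0 := by
  unfold aIndices idxs
  apply List.filter_congr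
  intro i hi
  have hi' : i < l.length := List.mem_range.mp hi
  have := aEscLoop_parity l i (le_of_lt hi') false
  unfold aIsEscaped
  rw [this]
  rcases Nat.mod_two_eq_zero_or_one ((l.take i).foldl bStep 0) with hp | hp <;>
    simp [hp]

theorem mkTok_shift (c : Char) (t : List Char) :
    ∀ (I : List Nat) (st : Nat),
      mkTok (c :: t) (st+1) (I.map (· + 1)) = mkTok t st I := by
  intro I
  induction I with
  | nil => intro st; simp [mkTok]
  | cons i is ih =>
    intro st
    simp only [List.map_cons, mkTok, List.drop_succ_cons]
    rw [show i + 1 - (st + 1) = i - st by omega]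
    rw [ih (i+1)]

theorem idxs_cons (delim : List Char) (c : Char) (t : List Char) (bs : Nat) :
    idxs delim (c :: t) bs =
      (if [c] = delim ∧ bs % 2 = 0 then [0] else [])
        ++ (idxs delim t (bStep bs c)).map (· + 1) := by
  unfold idxs
  rw [show (c :: t).length = t.length + 1 by simp]
  rw [List.range_succ_eq_map, List.filter_cons, List.filter_map]
  have hpred : ∀ i ∈ List.range t.length,
      ((fun i => decide ([(c :: t).getD i ' '] = delim) &&
         decide (List.foldl bStep bs (List.take i (c :: t)) % 2 = 0)) ∘ Nat.succ) i
      = (fun i => decide ([t.getD i ' '] = delim) &&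
         decide (List.foldl bStep (bStep bs c) (List.take i t) % 2 = 0)) i := by
    intro i _
    rfl
  rw [List.filter_congr hpred]
  by_cases h : [c] = delim ∧ bs % 2 = 0
  · rw [if_pos h]
    rw [if_pos (by simp [h.1, h.2] :
      (decide ([(c :: t).getD 0 ' '] = delim) &&
        decide (List.foldl bStep bs (List.take 0 (c :: t)) % 2 = 0)) = true)]
    simp
  · rw [if_neg h]
    rw [if_neg (by
      simp only [List.getD_cons_zero, List.take_zero, List.foldl_nil,
        Bool.and_eq_true, decide_eq_true_eq]
      exact fun hc => h hc)]
    simp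

theorem goSplit_eq_mkTok (delim : List Char) :
    ∀ (l : List Char) (bs : Nat), goSplit delim l bs = mkTok l 0 (idxs delim l bs) := by
  intro l
  induction l with
  | nil => intro bs; simp [goSplit, idxs, mkTok]
  | cons c t ih =>
    intro bs
    rw [idxs_cons]
    by_cases h : [c] = delim ∧ bs % 2 = 0
    · rw [if_pos h]
      simp only [goSplit, if_pos h, List.singleton_append]
      rw [ih (bStep bs c)]
      have hs := mkTok_shift c t (idxs delim t (bStep bs c)) 0
      simp only [mkTok, Nat.sub_self, List.take_zero, List.drop_zero, Nat.zero_add] at hs ⊢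
      rw [hs]
    · rw [if_neg h]
      simp only [goSplit, if_neg h, List.nil_append]
      rw [ih (bStep bs c)]
      cases hI : idxs delim t (bStep bs c) with
      | nil => simp [mkTok]
      | cons i is =>
        have hs := mkTok_shift c t is (i + 1)
        simp only [mkTok, List.map_cons, List.drop_zero, Nat.sub_zero,
          List.take_succ_cons] at hs ⊢
        rw [hs]

theorem bFold_eq_goSplit (delim : List Char) :
    ∀ (t : List Char) (tokens : List (List Char)) (cur : List Char) (bs : Nat),
      (t.foldl (bSplitStep delim) (tokens, cur, bs)).1
        ++ [(t.foldl (bSplitStep delim) (tokens, cur, bs)).2.1]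
        = tokens ++ consHead cur (goSplit delim t bs) := by
  intro t
  induction t with
  | nil => intro tokens cur bs; simp [goSplit, consHead]
  | cons c t ih =>
    intro tokens cur bs
    rw [List.foldl_cons]
    by_cases h : [c] = delim ∧ bs % 2 = 0
    · rw [show bSplitStep delim (tokens, cur, bs) c = (tokens ++ [cur], [], bStep bs c) by
        simp [bSplitStep, h]]
      rw [ih (tokens ++ [cur]) [] (bStep bs c)]
      simp only [goSplit, if_pos h]
      rcases hg : goSplit delim t (bStep bs c) with _ | ⟨u, us⟩
      · exact absurd hg (goSplit_ne_nil delim t (bStep bs c))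
      · simp [consHead]
    · rw [show bSplitStep delim (tokens, cur, bs) c = (tokens, cur ++ [c], bStep bs c) by
        simp [bSplitStep, h]]
      rw [ih tokens (cur ++ [c]) (bStep bs c)]
      simp only [goSplit, if_neg h]
      rcases hg : goSplit delim t (bStep bs c) with _ | ⟨u, us⟩
      · exact absurd hg (goSplit_ne_nil delim t (bStep bs c))
      · simp [consHead]

theorem lastD_eq (i0 : Nat) (rest : List Nat) :
    (i0 :: rest).getLast?.getD 0 = lastD i0 rest := by
  induction rest generalizing i0 with
  | nil => simp [lastD]
  | cons i is ih => rw [List.getLast?_cons_cons, ih i]; rfl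

theorem mkTok_pairToks (l : List Char) :
    ∀ (rest : List Nat) (p : Nat),
      mkTok l (p+1) rest = pairToks l p rest ++ [l.drop (lastD p rest + 1)] := by
  intro rest
  induction rest with
  | nil => intro p; simp [mkTok, pairToks, lastD]
  | cons i is ih => intro p; simp only [mkTok, pairToks, lastD, ih i, List.cons_append]

theorem aFold_bridge (l : List Char) (I : List Nat) :
    ∀ (rest : List Nat) (k : Nat) (p : Nat) (tokens : List (List Char)),
      1 ≤ k →
      (∀ m, I.getD (k + m) 0 = rest.getD m 0) →
      I.getD (k - 1) 0 = p →
      (rest.zipIdx k).foldl (aSliceToken l I) tokens = tokens ++ pairToks l p rest := by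
  intro rest
  induction rest with
  | nil => intro k p tokens _ _ _; simp [pairToks]
  | cons i is ih =>
    intro k p tokens hk h hprev
    rw [List.zipIdx_cons, List.foldl_cons]
    rw [show aSliceToken l I tokens (i, k) = tokens ++ [(l.drop (p+1)).take (i - (p+1))] by
      unfold aSliceToken
      rw [if_neg (by omega)]
      simp only
      rw [hprev]]
    rw [ih (k+1) i (tokens ++ [(l.drop (p+1)).take (i - (p+1))]) (by omega)
      (fun m => by have := h (m+1); simpa [show k + 1 + m = k + (m+1) by omega] using this)
      (by have := h 0; simpa using this)]
    simp [pairToks]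

theorem aTokens_eq_mkTok (l : List Char) (I : List Nat) :
    aTokens l I = mkTok l 0 I := by
  cases I with
  | nil => simp [aTokens, mkTok]
  | cons i0 rest =>
    unfold aTokens
    rw [if_neg (by simp)]
    rw [List.zipIdx_cons, List.foldl_cons]
    rw [show aSliceToken l (i0 :: rest) [] (i0, 0) = [l.take i0] by simp [aSliceToken]]
    rw [show (0:Nat) + 1 = 1 from rfl]
    rw [aFold_bridge l (i0 :: rest) rest 1 i0 [l.take i0] (by omega)
      (fun m => by simp [Nat.add_comm 1 m]) (by simp)]
    rw [lastD_eq]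
    simp only [mkTok, List.drop_zero, Nat.sub_zero]
    rw [mkTok_pairToks l rest i0]
    simp

theorem unescape_loop (s : List Char) :
    ∀ (t : List Char) (k : Nat) (esc : Bool) (e : Option (List Char))
      (out : List Char) (pending : Bool),
      s.drop k = t →
      (match e with
       | none => out = s.take k ∧ esc = false ∧ pending = false
       | some o => o = out ∧ esc = pending) →
      ((t.zipIdx k).foldl
        (fun (st : Bool × Option (List Char)) (p : Char × Nat) =>
          if p.1 = '\\' then
            let escaped := match st.2 with | none => some (s.take p.2) | some e => some e
            let is_escape := !st.1
            (is_escape, if is_escape then escaped else escaped.map (fun e => e ++ ['\\']))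
          else (false, st.2.map (fun e => e ++ [p.1])))
        (esc, e)).2.getD s
      = (t.foldl (fun (st : List Char × Bool) c =>
          if c = '\\' then
            if st.2 then (st.1 ++ ['\\'], false) else (st.1, true)
          else (st.1 ++ [c], false)) (out, pending)).1 := by
  intro t
  induction t with
  | nil =>
    intro k esc e out pending hdrop hinv
    have hk : s.length ≤ k := by
      by_contra hlt
      have := List.drop_eq_nil_iff.mp hdrop
      omega
    cases e with
    | none =>
      obtain ⟨h1, _, _⟩ := hinv
      simp only [List.zipIdx_nil, List.foldl_nil, Option.getD_none]
      rw [h1, List.take_of_length_le hk]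
    | some o =>
      obtain ⟨h1, _⟩ := hinv
      simp only [List.zipIdx_nil, List.foldl_nil, Option.getD_some]
      exact h1
  | cons c t ih =>
    intro k esc e out pending hdrop hinv
    have hk : k < s.length := by
      by_contra hge
      rw [List.drop_eq_nil_iff.mpr (by omega)] at hdrop
      exact absurd hdrop.symm (List.cons_ne_nil c t)
    have hdrop' : s.drop (k+1) = t := by
      have := congrArg List.tail hdrop
      simpa [List.tail_drop] using this
    have hck : s[k]? = some c := by
      have : (s.drop k)[0]? = some c := by rw [hdrop]; rfl
      simpa using this
    have hget : s[k] = c := by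
      have := List.getElem?_eq_getElem hk (l := s)
      rw [hck] at this; exact (Option.some.inj this).symm
    have htake : s.take (k+1) = s.take k ++ [c] := by
      simp [List.take_add_one, hck]
    rw [List.zipIdx_cons, List.foldl_cons, List.foldl_cons]
    by_cases hc : c = '\\'
    · subst hc
      rw [if_pos rfl, if_pos rfl]
      cases e with
      | none =>
        obtain ⟨h1, h2, h3⟩ := hinv
        subst h1; subst h2; subst h3
        exact ih (k+1) true (some (s.take k)) (s.take k) true hdrop' ⟨rfl, rfl⟩
      | some o =>
        obtain ⟨h1, h2⟩ := hinv
        subst h1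
        rw [← h2]
        cases esc with
        | false =>
          exact ih (k+1) true (some o) o true hdrop' ⟨rfl, rfl⟩
        | true =>
          exact ih (k+1) false (some (o ++ ['\\'])) (o ++ ['\\']) false hdrop' ⟨rfl, rfl⟩
    · rw [if_neg hc, if_neg hc]
      cases e with
      | none =>
        obtain ⟨h1, h2, h3⟩ := hinv
        subst h1; subst h2; subst h3
        exact ih (k+1) false none (List.take k s ++ [c]) false hdrop' ⟨htake.symm, rfl, rfl⟩
      | some o =>
        obtain ⟨h1, h2⟩ := hinv
        subst h1
        exact ih (k+1) false (some (o ++ [c])) (o ++ [c]) false hdrop' ⟨rfl, rfl⟩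

theorem aUnescape_eq_bUnescape : aUnescape = bUnescape := by
  funext s
  unfold aUnescape bUnescape
  exact unescape_loop s s 0 false none [] false (by simp) ⟨by simp, rfl, rfl⟩

theorem tokens_eq (l delim : List Char) :
    aTokens l (aIndices l delim)
      = (l.foldl (bSplitStep delim) ([], [], 0)).1
        ++ [(l.foldl (bSplitStep delim) ([], [], 0)).2.1] := by
  have hb := bFold_eq_goSplit delim l [] [] 0
  rw [List.nil_append] at hb
  rw [aIndices_eq_idxs, aTokens_eq_mkTok, ← goSplit_eq_mkTok, hb]
  rcases hg : goSplit delim l 0 with _ | ⟨u, us⟩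
  · exact absurd hg (goSplit_ne_nil delim l 0)
  · simp [consHead]

theorem filter_len_eq (ts : List (List Char)) :
    ts.filter (fun t => decide (t.length > 0)) = ts.filter (fun t => !t.isEmpty) := by
  apply List.filter_congr
  intro t _
  cases t <;> simp

-- ===== VERDICT (by name: the statement is the Claim_ definition above) =====
theorem split_non_escaped_py_spec : Claim_equal_split_non_escaped_py := by
  intro line delim is_keep_empty is_unescape _
  unfold Spec_split_non_escaped_py split_non_escaped_py split_non_escaped_py_alt
  simp only
  rw [tokens_eq line.toList delim.toList, aUnescape_eq_bUnescape,
    filter_len_eq]
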